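-- pv_equiv track=rewrite | github.com/KandesQ/url-shortener | usecases/create_url.py | _get_short_identifier
-- ===== SOURCE A (Python) =====
-- import string
--
-- _SHORT_IDENTIFIER_LENGTH = 6
--
-- _ALL_CASES_ASCII_ALPHABET = string.ascii_letters
--
-- _BASE = len(_ALL_CASES_ASCII_ALPHABET)
--
-- def _get_short_identifier(num: int) -> str:
--     """
--     Creates a 6 digit short identifier from given number
--
--     The output identifier contains letters from both upper and lower cases of ASCII
--
--     :param num: number to encode
--     :return: short identifier
--     """
--     tmp = []
--     while num > 0:
--         num, remainder = divmod(num, _BASE)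
--         tmp.append(_ALL_CASES_ASCII_ALPHABET[remainder])
--
--     while len(tmp) < _SHORT_IDENTIFIER_LENGTH:
--         tmp.append(_ALL_CASES_ASCII_ALPHABET[0])
--
--     return "".join(reversed(tmp))
-- ===== SOURCE B (Python) =====
-- import string
--
-- _SHORT_IDENTIFIER_LENGTH = 6
--
-- _ALL_CASES_ASCII_ALPHABET = string.ascii_letters
--
-- _BASE = len(_ALL_CASES_ASCII_ALPHABET)
--
-- def _encode(n: int) -> str:
--     """Base-52 digits of n, most-significant first; empty for n <= 0."""
--     if n <= 0:
--         return ""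
--     return _encode(n // _BASE) + _ALL_CASES_ASCII_ALPHABET[n % _BASE]
--
-- def _get_short_identifier(num: int) -> str:
--     return _encode(num).rjust(_SHORT_IDENTIFIER_LENGTH, _ALL_CASES_ASCII_ALPHABET[0])
-- ===== Notes on version B (the rewrite author's own statement) =====
-- stated objective: simpler
-- what changed: Replaces the two accumulate-then-reverse-and-join while loops with a recursive most-significant-first base-52 encoder plus a single str.rjust for the padding.
import Mathlib
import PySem

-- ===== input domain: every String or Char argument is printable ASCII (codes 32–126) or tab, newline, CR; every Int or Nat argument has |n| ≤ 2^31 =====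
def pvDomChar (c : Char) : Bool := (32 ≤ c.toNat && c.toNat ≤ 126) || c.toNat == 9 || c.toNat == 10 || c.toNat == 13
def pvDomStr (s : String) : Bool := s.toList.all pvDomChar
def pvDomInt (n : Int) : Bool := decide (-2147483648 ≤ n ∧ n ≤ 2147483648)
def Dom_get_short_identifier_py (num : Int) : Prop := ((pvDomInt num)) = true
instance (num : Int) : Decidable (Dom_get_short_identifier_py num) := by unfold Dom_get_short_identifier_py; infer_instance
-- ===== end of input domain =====

-- B replaces A's accumulate-then-reverse-and-join loops with a recursive most-significant-first
-- base-52 encoder plus a single left-pad (str.rjust); same cost, simpler decomposition.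

-- _ALL_CASES_ASCII_ALPHABET = string.ascii_letters (shared module-level constant)
def pvAlphabet : List Char :=
  "abcdefghijklmnopqrstuvwxyzABCDEFGHIJKLMNOPQRSTUVWXYZ".toList

-- ===== PORT A =====
-- the 'while num > 0' loop; tmp in append order (least-significant digit first).
-- divmod(num, _BASE) with _BASE = 52 ≠ 0 never raises → floordiv/mod; the index
-- PySem.Int.mod num 52 lies in [0, 52) so the string index never raises (getD is unreachable).
def pvLoopA (num : Int) : List Char :=
  if num > 0 then
    ((PySem.List.pyGet? pvAlphabet (PySem.Int.mod num 52)).getD 'a')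
      :: pvLoopA (PySem.Int.floordiv num 52)
  else []
termination_by num.toNat
decreasing_by
  rw [PySem.Int.floordiv_eq_ediv_of_pos (by omega : (0:Int) < 52)]
  omega

-- the 'while len(tmp) < _SHORT_IDENTIFIER_LENGTH' padding loop
def pvPadA (tmp : List Char) : List Char :=
  if tmp.length < 6 then pvPadA (tmp ++ ['a']) else tmp
termination_by 6 - tmp.length
decreasing_by simp; omega

def get_short_identifier_py (num : Int) : String :=
  -- "".join(reversed(tmp))
  String.mk ((pvPadA (pvLoopA num)).reverse)

-- ===== PORT B =====
-- _encode: "" for n <= 0, else _encode(n // 52) + alphabet[n % 52] (most-significant first)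
def pvEncodeB (n : Int) : List Char :=
  if n ≤ 0 then []
  else pvEncodeB (PySem.Int.floordiv n 52)
       ++ [(PySem.List.pyGet? pvAlphabet (PySem.Int.mod n 52)).getD 'a']
termination_by n.toNat
decreasing_by
  rw [PySem.Int.floordiv_eq_ediv_of_pos (by omega : (0:Int) < 52)]
  omega

def get_short_identifier_py_alt (num : Int) : String :=
  -- _encode(num).rjust(6, 'a'): 'a' * max(6 - len, 0) + s (Nat subtraction truncates at 0, exact)
  let s := pvEncodeB num
  String.mk (List.replicate (6 - s.length) 'a' ++ s)

-- ===== PRECONDITION & SPEC =====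
def Spec_get_short_identifier_py (num : Int) (out : String) : Prop := out = get_short_identifier_py_alt num
instance (num : Int) (out : String) : Decidable (Spec_get_short_identifier_py num out) := by unfold Spec_get_short_identifier_py; infer_instance

-- ===== CLAIM (what is proved, stated in full; the proofs are below) =====
def Claim_equal_get_short_identifier_py : Prop := ∀ (num : Int), Dom_get_short_identifier_py num → Spec_get_short_identifier_py num (get_short_identifier_py num)

-- ===== LEMMAS AND PROOFS =====

-- A's padding loop appends exactly the missing 'a's.
lemma pvPadA_eq (t : List Char) : pvPadA t = t ++ List.replicate (6 - t.length) 'a' := by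
  fun_induction pvPadA t with
  | case1 t h ih =>
      rw [ih]
      have : 6 - t.length = (6 - (t.length + 1)) + 1 := by omega
      simp [this, List.replicate_succ]
  | case2 t h =>
      have : 6 - t.length = 0 := by omega
      simp [this]

-- B's encoder is the reverse of A's digit list.
lemma pvEncodeB_eq (n : Int) : pvEncodeB n = (pvLoopA n).reverse := by
  fun_induction pvEncodeB n with
  | case1 n h =>
      rw [pvLoopA]
      simp [show ¬ n > 0 by omega]
  | case2 n h ih =>
      rw [pvLoopA, ih]
      simp [show n > 0 by omega]

-- ===== VERDICT (by name: the statement is the Claim_ definition above) =====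
theorem get_short_identifier_py_spec : Claim_equal_get_short_identifier_py := by
  intro num _
  unfold Spec_get_short_identifier_py get_short_identifier_py get_short_identifier_py_alt
  rw [pvPadA_eq, pvEncodeB_eq]
  simp
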